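-- pv_equiv track=rewrite | github.com/ikhwankhalid/grid_bold | utils/utils.py | divide_dataset
-- ===== SOURCE A (Python) =====
-- def divide_dataset(x, y, num_groups):
--     if len(x) != len(y):
--         raise ValueError("x and y must have the same length.")
--
--     if num_groups < 1:
--         raise ValueError("num_groups must be greater than 0.")
--
--     # Calculate the size of each group
--     group_size = len(x) // num_groups
--
--     # Calculate the number of elements that will be left after dividing into
--     # equal groups
--     remainder = len(x) % num_groups
--
--     groups = []
--
--     start_idx = 0
--     for i in range(num_groups):
--         end_idx = start_idx + group_size
--
--         # Distribute the remainder elements one by one to the groups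
--         if remainder > 0:
--             end_idx += 1
--             remainder -= 1
--
--         # Get the x and y values for this group
--         group_x = x[start_idx:end_idx]
--         group_y = y[start_idx:end_idx]
--
--         groups.append((group_x, group_y))
--
--         start_idx = end_idx
--
--     return groups
-- ===== SOURCE B (Python) =====
-- def divide_dataset(x, y, num_groups):
--     if len(x) != len(y):
--         raise ValueError("x and y must have the same length.")
--
--     if num_groups < 1:
--         raise ValueError("num_groups must be greater than 0.")
--
--     q, r = divmod(len(x), num_groups)
--     # boundary index of group i: the first r groups get one extra element
--     boundaries = [i * q + min(i, r) for i in range(num_groups + 1)]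
--     return [(x[s:e], y[s:e]) for s, e in zip(boundaries, boundaries[1:])]
-- ===== Notes on version B (the rewrite author's own statement) =====
-- stated objective: alternative
-- what changed: Replaces the running start_idx/remainder accumulator loop with a directly computed boundary table i*q+min(i,r) zipped pairwise into slices.
import Mathlib
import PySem

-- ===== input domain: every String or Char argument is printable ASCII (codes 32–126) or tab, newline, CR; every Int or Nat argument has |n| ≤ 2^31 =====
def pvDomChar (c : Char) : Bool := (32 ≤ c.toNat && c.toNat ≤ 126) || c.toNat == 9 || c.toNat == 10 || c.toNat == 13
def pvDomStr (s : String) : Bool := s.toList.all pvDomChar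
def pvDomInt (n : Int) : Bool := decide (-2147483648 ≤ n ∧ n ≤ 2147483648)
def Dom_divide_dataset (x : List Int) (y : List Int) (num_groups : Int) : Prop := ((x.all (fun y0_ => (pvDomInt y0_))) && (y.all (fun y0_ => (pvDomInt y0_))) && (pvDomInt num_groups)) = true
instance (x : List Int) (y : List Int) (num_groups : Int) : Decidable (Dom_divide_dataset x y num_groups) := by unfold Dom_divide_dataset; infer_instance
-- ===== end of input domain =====

-- B computes the group boundaries i*q+min(i,r) as a table and slices between consecutive
-- boundaries, instead of A's running start_idx/remainder accumulator (objective: alternative).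

-- ===== PORT A =====
def divide_dataset (x : List Int) (y : List Int) (num_groups : Int) : List (List Int × List Int) :=
  -- the two ValueError guards are excluded by Pre_divide_dataset
  let group_size := PySem.Int.floordiv (x.length : Int) num_groups
  let remainder := PySem.Int.mod (x.length : Int) num_groups
  let st := (PySem.List.pyRange 0 num_groups 1).foldl
    (fun (s : List (List Int × List Int) × Int × Int) _ =>
      let groups := s.1
      let start_idx := s.2.1
      let rem := s.2.2
      let end_idx := start_idx + group_size + (if rem > 0 then 1 else 0)
      let rem' := if rem > 0 then rem - 1 else rem
      (groups ++ [(PySem.List.slice x (some start_idx) (some end_idx),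
                   PySem.List.slice y (some start_idx) (some end_idx))], end_idx, rem'))
    ([], 0, remainder)
  st.1

-- ===== PORT B =====
def divide_dataset_alt (x : List Int) (y : List Int) (num_groups : Int) : List (List Int × List Int) :=
  let q := PySem.Int.floordiv (x.length : Int) num_groups
  let r := PySem.Int.mod (x.length : Int) num_groups
  let boundaries := (PySem.List.pyRange 0 (num_groups + 1) 1).map (fun i => i * q + min i r)
  (boundaries.zip boundaries.tail).map (fun se =>
    (PySem.List.slice x (some se.1) (some se.2), PySem.List.slice y (some se.1) (some se.2)))

-- ===== PRECONDITION & SPEC =====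
-- exactly the inputs where A returns: equal lengths and num_groups ≥ 1 (else ValueError)
def Pre_divide_dataset (x : List Int) (y : List Int) (num_groups : Int) : Prop :=
  x.length = y.length ∧ 1 ≤ num_groups
instance (x : List Int) (y : List Int) (num_groups : Int) : Decidable (Pre_divide_dataset x y num_groups) := by unfold Pre_divide_dataset; infer_instance
def pvWitness_divide_dataset : List Int × List Int × Int := ([1, 2, 3, 4, 5], [6, 7, 8, 9, 10], 3)

def Spec_divide_dataset (x : List Int) (y : List Int) (num_groups : Int) (out : List (List Int × List Int)) : Prop := out = divide_dataset_alt x y num_groups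
instance (x : List Int) (y : List Int) (num_groups : Int) (out : List (List Int × List Int)) : Decidable (Spec_divide_dataset x y num_groups out) := by unfold Spec_divide_dataset; infer_instance

-- ===== CLAIM (what is proved, stated in full; the proofs are below) =====
def Claim_equal_divide_dataset : Prop := ∀ (x : List Int) (y : List Int) (num_groups : Int), Dom_divide_dataset x y num_groups → Pre_divide_dataset x y num_groups → Spec_divide_dataset x y num_groups (divide_dataset x y num_groups)

-- ===== LEMMAS AND PROOFS =====

-- boundary function of B
def pvBnd (q r i : Int) : Int := i * q + min i r

-- A's loop body, as a named function (definitionally equal to the lambda in the port)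
def pvStep (x y : List Int) (q : Int) (s : List (List Int × List Int) × Int × Int) (_ : Int) :
    List (List Int × List Int) × Int × Int :=
  (s.1 ++ [(PySem.List.slice x (some s.2.1) (some (s.2.1 + q + (if s.2.2 > 0 then 1 else 0))),
            PySem.List.slice y (some s.2.1) (some (s.2.1 + q + (if s.2.2 > 0 then 1 else 0))))],
   s.2.1 + q + (if s.2.2 > 0 then 1 else 0), if s.2.2 > 0 then s.2.2 - 1 else s.2.2)

-- A's loop invariant: starting from boundary pvBnd q r a with remainder r - min a r,
-- the loop over pyRange a b 1 appends exactly the slices between consecutive boundaries.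
theorem pvLoopA (x y : List Int) (q r : Int) (a b : Int) (hab : a ≤ b)
    (acc : List (List Int × List Int)) :
    (PySem.List.pyRange a b 1).foldl (pvStep x y q) (acc, pvBnd q r a, r - min a r)
    = (acc ++ (PySem.List.pyRange a b 1).map (fun i =>
        (PySem.List.slice x (some (pvBnd q r i)) (some (pvBnd q r (i + 1))),
         PySem.List.slice y (some (pvBnd q r i)) (some (pvBnd q r (i + 1))))),
       pvBnd q r b, r - min b r) := by
  have h : ∀ (n : Nat) (a : Int) (acc : List (List Int × List Int)), b - a = (n : Int) →
      (PySem.List.pyRange a b 1).foldl (pvStep x y q) (acc, pvBnd q r a, r - min a r)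
      = (acc ++ (PySem.List.pyRange a b 1).map (fun i =>
          (PySem.List.slice x (some (pvBnd q r i)) (some (pvBnd q r (i + 1))),
           PySem.List.slice y (some (pvBnd q r i)) (some (pvBnd q r (i + 1))))),
         pvBnd q r b, r - min b r) := by
    intro n
    induction n with
    | zero =>
      intro a acc hn
      rw [PySem.List.pyRange_one_eq_nil (by omega)]
      have : b = a := by omega
      subst this
      simp
    | succ m ih =>
      intro a acc hn
      rw [PySem.List.pyRange_one_cons (by omega : a < b)]
      simp only [List.foldl_cons, List.map_cons]
      have hend : pvBnd q r a + q + (if r - min a r > 0 then 1 else 0) = pvBnd q r (a + 1) := by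
        unfold pvBnd
        rw [add_one_mul]
        split_ifs with h <;> omega
      have hrem : (if r - min a r > 0 then r - min a r - 1 else r - min a r)
          = r - min (a + 1) r := by
        split_ifs with h <;> omega
      have hstep : pvStep x y q (acc, pvBnd q r a, r - min a r) a
          = (acc ++ [(PySem.List.slice x (some (pvBnd q r a)) (some (pvBnd q r (a + 1))),
              PySem.List.slice y (some (pvBnd q r a)) (some (pvBnd q r (a + 1))))],
             pvBnd q r (a + 1), r - min (a + 1) r) := by
        unfold pvStep
        simp only [hend, hrem]
      rw [hstep, ih (a + 1) _ (by omega)]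
      simp
  exact h (b - a).toNat a acc (by omega)

-- zip of a consecutive-integers list with its own tail = pairs (i, i+1)
theorem pvZipConsec (a b : Int) (hab : a ≤ b) :
    (PySem.List.pyRange a (b + 1) 1).zip (PySem.List.pyRange a (b + 1) 1).tail
      = (PySem.List.pyRange a b 1).map (fun i => (i, i + 1)) := by
  have h : ∀ (n : Nat) (a : Int), b - a = (n : Int) →
      (PySem.List.pyRange a (b + 1) 1).zip (PySem.List.pyRange a (b + 1) 1).tail
        = (PySem.List.pyRange a b 1).map (fun i => (i, i + 1)) := by
    intro n
    induction n with
    | zero =>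
      intro a hn
      rw [PySem.List.pyRange_one_cons (by omega : a < b + 1),
        PySem.List.pyRange_one_eq_nil (by omega), PySem.List.pyRange_one_eq_nil (by omega)]
      simp
    | succ m ih =>
      intro a hn
      have h2 : PySem.List.pyRange (a + 1) (b + 1) 1
          = (a + 1) :: PySem.List.pyRange (a + 1 + 1) (b + 1) 1 :=
        PySem.List.pyRange_one_cons (by omega)
      rw [PySem.List.pyRange_one_cons (by omega : a < b + 1), List.tail_cons, h2,
        List.zip_cons_cons, PySem.List.pyRange_one_cons (by omega : a < b), List.map_cons]
      congr 1
      have hih := ih (a + 1) (by omega)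
      rw [h2, List.tail_cons] at hih
      exact hih
  exact h (b - a).toNat a (by omega)

-- ===== VERDICT (by name: the statement is the Claim_ definition above) =====
theorem divide_dataset_spec : Claim_equal_divide_dataset := by
  intro x y num_groups _ hpre
  obtain ⟨hlen, hng⟩ := hpre
  unfold Spec_divide_dataset divide_dataset divide_dataset_alt
  set q := PySem.Int.floordiv (x.length : Int) num_groups with hq
  set r := PySem.Int.mod (x.length : Int) num_groups with hr
  have hr0 : 0 ≤ r := by
    rw [hr, PySem.Int.mod_eq_emod_of_pos (by omega : (0:Int) < num_groups)]
    exact Int.emod_nonneg _ (by omega)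
  show (List.foldl (pvStep x y q) ([], 0, r) (PySem.List.pyRange 0 num_groups 1)).1
      = List.map (fun se => (PySem.List.slice x (some se.1) (some se.2),
                             PySem.List.slice y (some se.1) (some se.2)))
          (((PySem.List.pyRange 0 (num_groups + 1) 1).map (fun i => i * q + min i r)).zip
            (((PySem.List.pyRange 0 (num_groups + 1) 1).map (fun i => i * q + min i r)).tail))
  have hinit : (([], 0, r) : List (List Int × List Int) × Int × Int)
      = ([], pvBnd q r 0, r - min 0 r) := by
    unfold pvBnd; simp [min_eq_left hr0]
  rw [hinit, pvLoopA x y q r 0 num_groups (by omega) []]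
  simp only [List.nil_append]
  rw [← List.map_tail, List.zip_map, pvZipConsec 0 num_groups (by omega), List.map_map,
    List.map_map]
  rfl
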